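-- pv_equiv track=rewrite | github.com/ctoth/propstore | propstore/cli/concept.py | _rewrite_claim_conditions
-- ===== SOURCE A (Python) =====
-- def _rename_cel_identifier(expression: str, old_name: str, new_name: str) -> str:
--     """Rename a CEL identifier without touching quoted string literals."""
--     result: list[str] = []
--     quote: str | None = None
--     i = 0
--     while i < len(expression):
--         ch = expression[i]
--         if quote is not None:
--             result.append(ch)
--             if ch == quote and (i == 0 or expression[i - 1] != "\\"):
--                 quote = None
--             i += 1
--             continue
--
--         if ch in ("'", '"'):
--             quote = ch
--             result.append(ch)
--             i += 1
--             continue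
--
--         if ch.isalpha() or ch == "_":
--             j = i + 1
--             while j < len(expression) and (expression[j].isalnum() or expression[j] == "_"):
--                 j += 1
--             token = expression[i:j]
--             result.append(new_name if token == old_name else token)
--             i = j
--             continue
--
--         result.append(ch)
--         i += 1
--
--     return "".join(result)
--
-- def _rewrite_condition_list(
--     conditions: object,
--     old_name: str,
--     new_name: str,
-- ) -> tuple[object, bool]:
--     if not isinstance(conditions, list):
--         return conditions, False
--     changed = False
--     rewritten: list[object] = []
--     for condition in conditions:
--         if isinstance(condition, str):
--             new_condition = _rename_cel_identifier(condition, old_name, new_name)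
--             changed = changed or new_condition != condition
--             rewritten.append(new_condition)
--         else:
--             rewritten.append(condition)
--     return rewritten, changed
--
-- def _rewrite_claim_conditions(claim_file_data: dict, old_name: str, new_name: str) -> bool:
--     changed = False
--     for claim in claim_file_data.get("claims", []) or []:
--         if not isinstance(claim, dict):
--             continue
--         rewritten, claim_changed = _rewrite_condition_list(claim.get("conditions"), old_name, new_name)
--         if claim_changed:
--             claim["conditions"] = rewritten
--             changed = True
--     return changed
-- ===== SOURCE B (Python) =====
-- def _rename_cel_identifier(expression: str, old_name: str, new_name: str) -> str:
--     """Single-pass character fold: buffer identifier chars, flush with replacement."""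
--     out: list[str] = []
--     buf: list[str] = []
--     quote: str | None = None
--     escaped = False
--
--     def flush() -> None:
--         if buf:
--             token = "".join(buf)
--             out.append(new_name if token == old_name else token)
--             buf.clear()
--
--     for ch in expression:
--         if quote is not None:
--             out.append(ch)
--             if ch == quote and not escaped:
--                 quote = None
--             escaped = ch == "\\"
--         elif (ch.isalnum() or ch == "_") and (buf or ch.isalpha() or ch == "_"):
--             buf.append(ch)
--         else:
--             flush()
--             out.append(ch)
--             if ch in ("'", '"'):
--                 quote = ch
--                 escaped = False
--     flush()
--     return "".join(out)
--
--
-- def _rewrite_claim_conditions(claim_file_data: dict, old_name: str, new_name: str) -> bool: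
--     changed = False
--     for claim in claim_file_data.get("claims") or []:
--         if not isinstance(claim, dict):
--             continue
--         conditions = claim.get("conditions")
--         if not isinstance(conditions, list):
--             continue
--         rewritten = [
--             _rename_cel_identifier(c, old_name, new_name) if isinstance(c, str) else c
--             for c in conditions
--         ]
--         if rewritten != conditions:
--             claim["conditions"] = rewritten
--             changed = True
--     return changed
-- ===== Notes on version B (the rewrite author's own statement) =====
-- stated objective: alternative
-- what changed: Replaces A's index-jumping scanner (outer while with an inner while that scans each identifier and a slice/compare per token) by a single character-at-a-time fold that carries an identifier buffer flushed with replacement at each token boundary; the per-claim changed flag becomes a whole-list comparison of the rewritten conditions.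
import Mathlib
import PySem

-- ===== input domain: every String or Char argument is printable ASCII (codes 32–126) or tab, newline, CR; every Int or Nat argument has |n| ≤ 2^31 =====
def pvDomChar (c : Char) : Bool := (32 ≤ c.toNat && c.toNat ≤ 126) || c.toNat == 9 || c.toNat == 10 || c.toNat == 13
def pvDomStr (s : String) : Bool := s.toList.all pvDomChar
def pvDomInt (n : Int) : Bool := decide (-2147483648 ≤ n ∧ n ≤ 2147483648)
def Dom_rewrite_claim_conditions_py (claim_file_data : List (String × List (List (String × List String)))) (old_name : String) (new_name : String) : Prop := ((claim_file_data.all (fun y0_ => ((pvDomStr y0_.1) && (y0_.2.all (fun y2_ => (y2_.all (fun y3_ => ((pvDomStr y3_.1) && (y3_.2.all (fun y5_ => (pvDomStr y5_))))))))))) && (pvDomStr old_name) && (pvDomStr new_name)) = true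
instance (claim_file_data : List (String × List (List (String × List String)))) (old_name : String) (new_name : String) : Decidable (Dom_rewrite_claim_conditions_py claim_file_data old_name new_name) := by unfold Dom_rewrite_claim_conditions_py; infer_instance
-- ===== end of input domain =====

-- B replaces A's index-jumping quote/identifier scanner by a single character-at-a-time
-- fold with an identifier buffer (objective: alternative decomposition, same cost).
-- Both A and B mutate claim["conditions"] in place; the equivalence proved here is about
-- the returned Bool only.

-- identifier-character predicates shared by both ports (each Python spells them inline)
def pvIsStart (c : Char) : Bool := PySem.Chars.isalpha c || c == '_'
def pvIsCont (c : Char) : Bool := PySem.Chars.isalnum c || c == '_'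

-- ===== PORT A =====
-- inner `while j < len(expression) and (expression[j].isalnum() or expression[j] == "_")`
def pvIdEnd (cs : List Char) (j : Nat) : Nat :=
  if h : j < cs.length then
    if pvIsCont cs[j] then pvIdEnd cs (j + 1) else j
  else j
termination_by cs.length - j

theorem pvIdEnd_ge (cs : List Char) (j : Nat) : j ≤ pvIdEnd cs j := by
  fun_induction pvIdEnd cs j with
  | case1 => omega
  | case2 => omega
  | case3 => omega

-- the `while i < len(expression)` loop of _rename_cel_identifier (state: quote, i, result)
def pvRenA (cs old new : List Char) (quote : Option Char) (i : Nat) (result : List Char) : List Char :=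
  if h : i < cs.length then
    let ch := cs[i]
    match quote with
    | some q =>
      -- `if ch == quote and (i == 0 or expression[i-1] != "\\")`
      if ch == q && ((i == 0) || !(PySem.List.pyGetD cs ((i : Int) - 1) ' ' == '\\')) then
        pvRenA cs old new none (i + 1) (result ++ [ch])
      else
        pvRenA cs old new (some q) (i + 1) (result ++ [ch])
    | none =>
      if ch == '\'' || ch == '"' then
        pvRenA cs old new (some ch) (i + 1) (result ++ [ch])
      else if pvIsStart ch then
        let j := pvIdEnd cs (i + 1)
        let token := PySem.List.slice cs (some (i : Int)) (some (j : Int))  -- expression[i:j]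
        pvRenA cs old new none j (result ++ (if token == old then new else token))
      else
        pvRenA cs old new none (i + 1) (result ++ [ch])
  else result
termination_by cs.length - i
decreasing_by
  · omega
  · omega
  · omega
  · have := pvIdEnd_ge cs (i + 1); omega
  · omega

def pvRenameA (expression old_name new_name : String) : String :=
  String.ofList (pvRenA expression.toList old_name.toList new_name.toList none 0 [])

-- _rewrite_condition_list: builds `rewritten` and the `changed` flag (conditions is always
-- a list of strings under the stated types; the isinstance branches are therefore taken)
def pvRewriteCondListA (conds : List String) (old_name new_name : String) : List String × Bool :=
  conds.foldl (fun st c =>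
    let nc := pvRenameA c old_name new_name
    (st.1 ++ [nc], st.2 || nc != c)) ([], false)

-- _rewrite_claim_conditions; `.get("claims", []) or []` = getD with default [] (the `or []`
-- is the identity on list values); claims are dicts by the stated types; the in-place write
-- of claim["conditions"] does not affect the returned flag
def rewrite_claim_conditions_py (claim_file_data : List (String × List (List (String × List String)))) (old_name : String) (new_name : String) : Bool :=
  (PySem.Dict.getD (PySem.Dict.mk claim_file_data) "claims" []).foldl
    (fun changed claim =>
      match PySem.Dict.get? (PySem.Dict.mk claim) "conditions" with
      | none => changed  -- conditions is None: not a list, claim_changed = False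
      | some conds => changed || (pvRewriteCondListA conds old_name new_name).2)
    false

-- ===== PORT B =====
-- `flush()` of Source B: emit the buffered token (renamed when it equals old_name)
def pvFlushTok (old new buf : List Char) : List Char :=
  if buf.isEmpty then [] else if buf == old then new else buf

-- one iteration of Source B's `for ch in expression` (state: quote, escaped, buf, out)
def pvStepB (old new : List Char) (st : Option Char × Bool × List Char × List Char) (ch : Char) :
    Option Char × Bool × List Char × List Char :=
  match st with
  | (some q, escaped, buf, out) =>
      (if ch == q && !escaped then none else some q, ch == '\\', buf, out ++ [ch])
  | (none, escaped, buf, out) =>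
      if pvIsCont ch && (!buf.isEmpty || pvIsStart ch) then
        (none, escaped, buf ++ [ch], out)
      else
        let out' := out ++ pvFlushTok old new buf ++ [ch]
        if ch == '\'' || ch == '"' then (some ch, false, [], out')
        else (none, escaped, [], out')

def pvRenameB (expression old_name new_name : String) : String :=
  let st := expression.toList.foldl (pvStepB old_name.toList new_name.toList) (none, false, [], [])
  String.ofList (st.2.2.2 ++ pvFlushTok old_name.toList new_name.toList st.2.2.1)

def rewrite_claim_conditions_py_alt (claim_file_data : List (String × List (List (String × List String)))) (old_name : String) (new_name : String) : Bool :=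
  (PySem.Dict.getD (PySem.Dict.mk claim_file_data) "claims" []).foldl
    (fun changed claim =>
      match PySem.Dict.get? (PySem.Dict.mk claim) "conditions" with
      | none => changed
      | some conds =>
          let rewritten := conds.map (fun c => pvRenameB c old_name new_name)
          changed || rewritten != conds)
    false

-- ===== PRECONDITION & SPEC =====
def Spec_rewrite_claim_conditions_py (claim_file_data : List (String × List (List (String × List String)))) (old_name : String) (new_name : String) (out : Bool) : Prop := out = rewrite_claim_conditions_py_alt claim_file_data old_name new_name
instance (claim_file_data : List (String × List (List (String × List String)))) (old_name : String) (new_name : String) (out : Bool) : Decidable (Spec_rewrite_claim_conditions_py claim_file_data old_name new_name out) := by unfold Spec_rewrite_claim_conditions_py; infer_instance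

-- ===== CLAIM (what is proved, stated in full; the proofs are below) =====
def Claim_equal_rewrite_claim_conditions_py : Prop := ∀ (claim_file_data : List (String × List (List (String × List String)))) (old_name : String) (new_name : String), Dom_rewrite_claim_conditions_py claim_file_data old_name new_name → Spec_rewrite_claim_conditions_py claim_file_data old_name new_name (rewrite_claim_conditions_py claim_file_data old_name new_name)

-- ===== LEMMAS AND PROOFS =====

-- B's final flush, applied to a fold state
def pvFinishB (old new : List Char) (st : Option Char × Bool × List Char × List Char) : List Char :=
  st.2.2.2 ++ pvFlushTok old new st.2.2.1

theorem pvStart_cont {c : Char} (h : pvIsStart c = true) : pvIsCont c = true := by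
  simp [pvIsStart, pvIsCont, PySem.Chars.isalnum] at *
  tauto

theorem pvIdEnd_le (cs : List Char) (j : Nat) (hj : j ≤ cs.length) : pvIdEnd cs j ≤ cs.length := by
  fun_induction pvIdEnd cs j with
  | case1 j h hc ih => exact ih (by omega)
  | case2 => omega
  | case3 => omega

theorem pvIdEnd_cont (cs : List Char) (j : Nat) :
    ∀ k, j ≤ k → k < pvIdEnd cs j → pvIsCont (cs.getD k ' ') = true := by
  fun_induction pvIdEnd cs j with
  | case1 j h hc ih =>
      intro k hk1 hk2
      rcases Nat.eq_or_lt_of_le hk1 with rfl | hlt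
      · simpa [List.getD, List.getElem?_eq_getElem h] using hc
      · exact ih k hlt hk2
  | case2 j h hc => omega
  | case3 j h => omega

theorem pvIdEnd_stop (cs : List Char) (j : Nat) (hj : j ≤ cs.length) :
    pvIdEnd cs j = cs.length ∨
      (pvIdEnd cs j < cs.length ∧ pvIsCont (cs.getD (pvIdEnd cs j) ' ') = false) := by
  fun_induction pvIdEnd cs j with
  | case1 j h hc ih => exact ih (by omega)
  | case2 j h hc =>
      right
      refine ⟨h, ?_⟩
      simpa [List.getD, List.getElem?_eq_getElem h] using hc
  | case3 j h => omega

-- L1: a run of identifier-continue characters is absorbed into a nonempty buffer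
theorem pvFoldB_absorb (old new : List Char) (mid : List Char) :
    ∀ (b : List Char) (e : Bool) (r rest : List Char), b ≠ [] →
      (∀ c ∈ mid, pvIsCont c = true) →
      List.foldl (pvStepB old new) (none, e, b, r) (mid ++ rest)
        = List.foldl (pvStepB old new) (none, e, b ++ mid, r) rest := by
  induction mid with
  | nil => intro b e r rest hb hm; simp
  | cons c t ih =>
      intro b e r rest hb hm
      have hc : pvIsCont c = true := hm c (by simp)
      have hbne : b.isEmpty = false := by simpa [List.isEmpty_iff] using hb
      have hstep : pvStepB old new (none, e, b, r) c = (none, e, b ++ [c], r) := by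
        simp [pvStepB, hc, hbne]
      simp only [List.cons_append, List.foldl_cons, hstep]
      rw [ih (b ++ [c]) e r rest (by simp) (fun x hx => hm x (by simp [hx]))]
      simp

-- L2: when the rest starts with a non-continue character (or is empty), a full buffer may be
-- flushed into the output up front
theorem pvFoldB_flush (old new : List Char) (rest : List Char) (b : List Char) (e : Bool) (r : List Char)
    (hrest : rest = [] ∨ pvIsCont (rest.headD ' ') = false) :
    pvFinishB old new (List.foldl (pvStepB old new) (none, e, b, r) rest)
      = pvFinishB old new (List.foldl (pvStepB old new) (none, e, [], r ++ pvFlushTok old new b) rest) := by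
  rcases rest with _ | ⟨c, t⟩
  · simp [pvFinishB, pvFlushTok]
  · have hc : pvIsCont c = false := by simpa using hrest.resolve_left (by simp)
    have hstep : ∀ b' r', pvStepB old new (none, e, b', r') c =
        (if c == '\'' || c == '"' then (some c, false, [], r' ++ pvFlushTok old new b' ++ [c])
         else (none, e, [], r' ++ pvFlushTok old new b' ++ [c])) := by
      intro b' r'; simp [pvStepB, hc]
    simp only [List.foldl_cons, hstep, pvFlushTok, List.isEmpty_nil]
    split <;> simp [List.append_assoc]

-- the main simulation: A's index machine from state (quote, i, result) equals B's fold over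
-- the remaining characters from the matching state with an empty buffer
theorem pvRen_sim (old new cs : List Char) :
    ∀ (n i : Nat) (q : Option Char) (e : Bool) (r : List Char),
      cs.length - i ≤ n →
      (∀ qc, q = some qc → 1 ≤ i ∧ e = (cs.getD (i - 1) ' ' == '\\')) →
      pvRenA cs old new q i r
        = pvFinishB old new (List.foldl (pvStepB old new) (q, e, [], r) (cs.drop i)) := by
  intro n
  induction n with
  | zero =>
      intro i q e r hn hq
      have hi : ¬ i < cs.length := by omega
      have hd : cs.drop i = [] := List.drop_of_length_le (by omega)
      rw [pvRenA, hd]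
      simp [hi, pvFinishB, pvFlushTok]
  | succ n ih =>
      intro i q e r hn hq
      by_cases hi : i < cs.length
      · have hdrop : cs.drop i = cs[i] :: cs.drop (i + 1) := List.drop_eq_getElem_cons hi
        have hgetD : cs.getD i ' ' = cs[i] := by
          simp [List.getD, List.getElem?_eq_getElem hi]
        rw [pvRenA]
        simp only [dif_pos hi]
        match hqq : q with
        | some qc =>
            obtain ⟨hi1, he⟩ := hq qc rfl
            have hpy : PySem.List.pyGetD cs ((i : Int) - 1) ' ' = cs.getD (i - 1) ' ' := by
              have : ((i : Int) - 1) = ((i - 1 : Nat) : Int) := by omega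
              rw [this, PySem.List.pyGetD_natCast]
            have hi0 : (i == 0) = false := by simp; omega
            rw [hdrop]
            simp only [List.foldl_cons]
            have hstep : pvStepB old new (some qc, e, [], r) cs[i]
                = (if cs[i] == qc && !e then none else some qc, cs[i] == '\\', [], r ++ [cs[i]]) := by
              simp [pvStepB]
            rw [hstep]
            by_cases hcl : (cs[i] == qc && !e) = true
            · have : (cs[i] == qc && ((i == 0) || !(PySem.List.pyGetD cs ((i : Int) - 1) ' ' == '\\'))) = true := by
                rw [hpy, hi0, ← he]
                simpa using hcl
              rw [if_pos this]
              rw [ih (i + 1) none (cs[i] == '\\') (r ++ [cs[i]]) (by omega) (by simp)]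
              simp [hcl]
            · have : (cs[i] == qc && ((i == 0) || !(PySem.List.pyGetD cs ((i : Int) - 1) ' ' == '\\'))) = false := by
                rw [hpy, hi0, ← he]
                simpa using hcl
              rw [if_neg (by simp [this])]
              rw [ih (i + 1) (some qc) (cs[i] == '\\') (r ++ [cs[i]])
                    (by omega) (by intro qc' h'; exact ⟨by omega, by simp only [Nat.add_sub_cancel, hgetD]⟩)]
              simp [hcl]
        | none =>
            by_cases hquo : (cs[i] == '\'' || cs[i] == '"') = true
            · rw [if_pos hquo, hdrop]
              simp only [List.foldl_cons]
              have hnc : pvIsCont cs[i] = false := by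
                rcases Bool.or_eq_true_iff.mp hquo with h | h <;>
                  · rw [eq_of_beq h]; decide
              have hstep : pvStepB old new (none, e, [], r) cs[i] = (some cs[i], false, [], r ++ [cs[i]]) := by
                simp [pvStepB, hnc, pvFlushTok, hquo]
              rw [hstep]
              rw [ih (i + 1) (some cs[i]) false (r ++ [cs[i]]) (by omega) ?_]
              intro qc' h'
              refine ⟨by omega, ?_⟩
              simp only [Nat.add_sub_cancel, hgetD]
              rcases Bool.or_eq_true_iff.mp hquo with h | h <;>
                · have := eq_of_beq h; rw [this]; decide
            · rw [if_neg hquo]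
              by_cases hst : pvIsStart cs[i] = true
              · rw [if_pos hst]
                -- identifier run
                set j := pvIdEnd cs (i + 1) with hjdef
                have hj1 : i + 1 ≤ j := pvIdEnd_ge cs (i + 1)
                have hjle : j ≤ cs.length := pvIdEnd_le cs (i + 1) (by omega)
                have hmid : cs.drop (i + 1) = (cs.drop (i + 1)).take (j - (i + 1)) ++ cs.drop j := by
                  conv_lhs => rw [← List.take_append_drop (j - (i + 1)) (cs.drop (i + 1))]
                  rw [List.drop_drop]
                  have : i + 1 + (j - (i + 1)) = j := by omega
                  rw [this]
                have htok : PySem.List.slice cs (some (i : Int)) (some (j : Int))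
                    = cs[i] :: (cs.drop (i + 1)).take (j - (i + 1)) := by
                  rw [PySem.List.slice_natCast]
                  rw [List.drop_eq_getElem_cons hi]
                  have : j - i = (j - (i + 1)) + 1 := by omega
                  rw [this, List.take_succ_cons]
                have hmidcont : ∀ c ∈ (cs.drop (i + 1)).take (j - (i + 1)), pvIsCont c = true := by
                  intro c hcmem
                  obtain ⟨t, ht, hval⟩ := List.mem_iff_getElem.mp hcmem
                  have hlen : t < j - (i + 1) := by
                    have := ht
                    simp [List.length_take, List.length_drop] at this
                    omega
                  have : c = cs.getD (i + 1 + t) ' ' := by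
                    rw [← hval]
                    have hidx : i + 1 + t < cs.length := by omega
                    simp [List.getD, List.getElem?_eq_getElem hidx,
                      List.getElem_take, List.getElem_drop]
                  rw [this]
                  exact pvIdEnd_cont cs (i + 1) (i + 1 + t) (by omega) (by omega)
                rw [hdrop, hmid]
                simp only [List.foldl_cons]
                have hstep : pvStepB old new (none, e, [], r) cs[i] = (none, e, [cs[i]], r) := by
                  simp [pvStepB, pvStart_cont hst, hst]
                rw [hstep]
                rw [pvFoldB_absorb old new _ [cs[i]] e r (cs.drop j) (by simp) hmidcont]
                have hrest : cs.drop j = [] ∨ pvIsCont ((cs.drop j).headD ' ') = false := by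
                  rcases pvIdEnd_stop cs (i + 1) (by omega) with h | ⟨h1, h2⟩
                  · left; rw [← hjdef] at h; simp [h]
                  · right
                    rw [← hjdef] at h1 h2
                    rw [List.drop_eq_getElem_cons h1]
                    simpa [List.getD, List.getElem?_eq_getElem h1] using h2
                rw [pvFoldB_flush old new (cs.drop j) _ e r hrest]
                have hflush : pvFlushTok old new (cs[i] :: (cs.drop (i + 1)).take (j - (i + 1)))
                    = (if (cs[i] :: (cs.drop (i + 1)).take (j - (i + 1))) == old then new
                       else cs[i] :: (cs.drop (i + 1)).take (j - (i + 1))) := by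
                  simp [pvFlushTok]
                rw [ih j none e (r ++ (if PySem.List.slice cs (some (i:Int)) (some (j:Int)) == old then new
                      else PySem.List.slice cs (some (i:Int)) (some (j:Int)))) (by omega) (by simp)]
                congr 2
                rw [htok]
                simp [pvFlushTok]
              · rw [if_neg hst, hdrop]
                simp only [List.foldl_cons]
                have hstep : pvStepB old new (none, e, [], r) cs[i] = (none, e, [], r ++ [cs[i]]) := by
                  have hstf : pvIsStart cs[i] = false := by simpa using hst
                  simp [pvStepB, hstf, pvFlushTok, hquo]
                rw [hstep]
                rw [ih (i + 1) none e (r ++ [cs[i]]) (by omega) (by simp)]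
      · have hd : cs.drop i = [] := List.drop_of_length_le (by omega)
        rw [pvRenA, hd]
        simp [hi, pvFinishB, pvFlushTok]

theorem pvRename_eq (expression old_name new_name : String) :
    pvRenameA expression old_name new_name = pvRenameB expression old_name new_name := by
  unfold pvRenameA pvRenameB
  rw [pvRen_sim old_name.toList new_name.toList expression.toList expression.toList.length 0
      none false [] (by omega) (by simp)]
  simp [pvFinishB]

-- A's per-list changed flag equals B's list comparison
theorem pvCondList_eq (old_name new_name : String) (conds : List String) :
    ∀ (acc : List String) (b : Bool),
      (conds.foldl (fun st c =>
          let nc := pvRenameA c old_name new_name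
          (st.1 ++ [nc], st.2 || nc != c)) (acc, b)).2
        = (b || (conds.map (fun c => pvRenameB c old_name new_name) != conds)) := by
  induction conds with
  | nil => intro acc b; simp
  | cons c t ih =>
      intro acc b
      simp only [List.foldl_cons, List.map_cons]
      rw [ih]
      rw [pvRename_eq]
      have : ((pvRenameB c old_name new_name :: t.map (fun c => pvRenameB c old_name new_name))
          != (c :: t)) = ((pvRenameB c old_name new_name != c)
            || (t.map (fun c => pvRenameB c old_name new_name) != t)) := by
        simp [bne, List.cons_beq_cons]
      rw [this, ← Bool.or_assoc]

-- ===== VERDICT (by name: the statement is the Claim_ definition above) =====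
theorem rewrite_claim_conditions_py_spec : Claim_equal_rewrite_claim_conditions_py := by
  intro claim_file_data old_name new_name _
  unfold Spec_rewrite_claim_conditions_py
  unfold rewrite_claim_conditions_py rewrite_claim_conditions_py_alt
  generalize (PySem.Dict.getD (PySem.Dict.mk claim_file_data) "claims" []) = claims
  induction claims using List.reverseRecOn with
  | nil => rfl
  | append_singleton t claim ih =>
      simp only [List.foldl_append, List.foldl_cons, List.foldl_nil, ih]
      cases PySem.Dict.get? (PySem.Dict.mk claim) "conditions" with
      | none => rfl
      | some conds =>
          simp only [pvRewriteCondListA]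
          rw [pvCondList_eq old_name new_name conds [] false]
          simp
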